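-- pv_equiv track=rewrite | github.com/uowllnh/coding_study | Beakjoon/문제풀이/다이얼/jeoeo.py | calculate_dial_time
-- ===== SOURCE A (Python) =====
-- def calculate_dial_time(word):
--     total_time = 0
--
--     for c in word:
--         if c in 'ABC':
--             total_time += 3  # A, B, C -> 3초
--         elif c in 'DEF':
--             total_time += 4  # D, E, F -> 4초
--         elif c in 'GHI':
--             total_time += 5  # G, H, I -> 5초
--         elif c in 'JKL':
--             total_time += 6  # J, K, L -> 6초
--         elif c in 'MNO':
--             total_time += 7  # M, N, O -> 7초
--         elif c in 'PQRS':
--             total_time += 8  # P, Q, R, S -> 8초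
--         elif c in 'TUV':
--             total_time += 9  # T, U, V -> 9초
--         elif c in 'WXYZ':
--             total_time += 10 # W, X, Y, Z -> 10초
--
--     return total_time
-- ===== SOURCE B (Python) =====
-- GROUPS = ['ABC', 'DEF', 'GHI', 'JKL', 'MNO', 'PQRS', 'TUV', 'WXYZ']
--
--
-- def calculate_dial_time(word):
--     total = 0
--     for time, group in enumerate(GROUPS, 3):
--         total += time * sum(c in group for c in word)
--     return total
-- ===== Notes on version B (the rewrite author's own statement) =====
-- stated objective: alternative
-- what changed: Instead of one pass over the word with an eight-branch elif cascade per character, B makes one pass per dial group (8 staged passes), counting the word's characters belonging to that group and adding time * count; correctness relies on addition commuting across the regrouped sum.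
import Mathlib
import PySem

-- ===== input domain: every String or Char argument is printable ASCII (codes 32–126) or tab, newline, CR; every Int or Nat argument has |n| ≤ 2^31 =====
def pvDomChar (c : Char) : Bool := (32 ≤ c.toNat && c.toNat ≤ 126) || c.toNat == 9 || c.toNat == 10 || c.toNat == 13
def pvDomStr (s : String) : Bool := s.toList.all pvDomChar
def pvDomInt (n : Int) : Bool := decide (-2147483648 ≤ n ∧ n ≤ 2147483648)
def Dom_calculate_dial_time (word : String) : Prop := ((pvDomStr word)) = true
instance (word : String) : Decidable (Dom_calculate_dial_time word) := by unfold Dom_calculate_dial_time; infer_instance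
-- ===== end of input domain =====

-- B replaces A's single pass with an eight-branch cascade by one counting pass per dial
-- group (8 staged passes), adding time * count per group; objective: alternative.

-- ===== PORT A =====
def calculate_dial_time (word : String) : Int :=
  word.toList.foldl
    (fun total_time c =>
      if c ∈ "ABC".toList then total_time + 3
      else if c ∈ "DEF".toList then total_time + 4
      else if c ∈ "GHI".toList then total_time + 5
      else if c ∈ "JKL".toList then total_time + 6
      else if c ∈ "MNO".toList then total_time + 7
      else if c ∈ "PQRS".toList then total_time + 8
      else if c ∈ "TUV".toList then total_time + 9
      else if c ∈ "WXYZ".toList then total_time + 10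
      else total_time)
    0

-- ===== PORT B =====
-- Source B's GROUPS; enumerate(GROUPS, 3) is the zip with pyRange 3 11
def pvGroups : List String := ["ABC", "DEF", "GHI", "JKL", "MNO", "PQRS", "TUV", "WXYZ"]

def calculate_dial_time_alt (word : String) : Int :=
  (List.zip (PySem.List.pyRange 3 11 1) pvGroups).foldl
    (fun total tg =>
      total + tg.1 * (word.toList.map (fun c => if c ∈ tg.2.toList then (1 : Int) else 0)).sum)
    0

-- ===== PRECONDITION & SPEC =====
def Spec_calculate_dial_time (word : String) (out : Int) : Prop := out = calculate_dial_time_alt word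
instance (word : String) (out : Int) : Decidable (Spec_calculate_dial_time word out) := by unfold Spec_calculate_dial_time; infer_instance

-- ===== CLAIM =====
def Claim_equal_calculate_dial_time : Prop := ∀ (word : String), Dom_calculate_dial_time word → Spec_calculate_dial_time word (calculate_dial_time word)

-- ===== LEMMAS AND PROOFS =====

-- A's per-character branch value, factored out for the proof
def pvBranch (c : Char) : Int :=
  if c ∈ "ABC".toList then 3
  else if c ∈ "DEF".toList then 4
  else if c ∈ "GHI".toList then 5
  else if c ∈ "JKL".toList then 6
  else if c ∈ "MNO".toList then 7
  else if c ∈ "PQRS".toList then 8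
  else if c ∈ "TUV".toList then 9
  else if c ∈ "WXYZ".toList then 10
  else 0

-- per-group indicator and its sum over the word
def pvInd (c : Char) (g : String) : Int := if c ∈ g.toList then 1 else 0

def pvS (g : String) (l : List Char) : Int := (l.map (fun c => pvInd c g)).sum

-- each character contributes across the eight groups exactly its branch value
set_option maxRecDepth 8192 in
theorem pvBranch_eq_groups_lt128 :
    ∀ n : Nat, n < 128 →
      pvBranch (Char.ofNat n) =
        3 * pvInd (Char.ofNat n) "ABC" + 4 * pvInd (Char.ofNat n) "DEF" +
        5 * pvInd (Char.ofNat n) "GHI" + 6 * pvInd (Char.ofNat n) "JKL" +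
        7 * pvInd (Char.ofNat n) "MNO" + 8 * pvInd (Char.ofNat n) "PQRS" +
        9 * pvInd (Char.ofNat n) "TUV" + 10 * pvInd (Char.ofNat n) "WXYZ" := by
  decide

theorem pvBranch_eq_groups (c : Char) (h : pvDomChar c = true) :
    pvBranch c =
      3 * pvInd c "ABC" + 4 * pvInd c "DEF" + 5 * pvInd c "GHI" + 6 * pvInd c "JKL" +
      7 * pvInd c "MNO" + 8 * pvInd c "PQRS" + 9 * pvInd c "TUV" + 10 * pvInd c "WXYZ" := by
  have h128 : c.toNat < 128 := by
    simp [pvDomChar] at h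
    omega
  have := pvBranch_eq_groups_lt128 c.toNat h128
  rwa [Char.ofNat_toNat] at this

-- A's fold equals the per-character branch sum
theorem pvFold_eq (l : List Char) (a : Int) :
    l.foldl
      (fun total_time c =>
        if c ∈ "ABC".toList then total_time + 3
        else if c ∈ "DEF".toList then total_time + 4
        else if c ∈ "GHI".toList then total_time + 5
        else if c ∈ "JKL".toList then total_time + 6
        else if c ∈ "MNO".toList then total_time + 7
        else if c ∈ "PQRS".toList then total_time + 8
        else if c ∈ "TUV".toList then total_time + 9
        else if c ∈ "WXYZ".toList then total_time + 10
        else total_time) a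
      = a + (l.map pvBranch).sum := by
  induction l generalizing a with
  | nil => simp
  | cons c l ih =>
    have hstep :
        (if c ∈ "ABC".toList then a + 3
         else if c ∈ "DEF".toList then a + 4
         else if c ∈ "GHI".toList then a + 5
         else if c ∈ "JKL".toList then a + 6
         else if c ∈ "MNO".toList then a + 7
         else if c ∈ "PQRS".toList then a + 8
         else if c ∈ "TUV".toList then a + 9
         else if c ∈ "WXYZ".toList then a + 10
         else a) = a + pvBranch c := by
      unfold pvBranch
      split_ifs <;> omega
    simp only [List.foldl_cons, List.map_cons, List.sum_cons, hstep, ih]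
    ring

-- B's fold over the eight concrete (time, group) pairs, written out
theorem pvAlt_expand (word : String) :
    calculate_dial_time_alt word =
      3 * pvS "ABC" word.toList + 4 * pvS "DEF" word.toList + 5 * pvS "GHI" word.toList +
      6 * pvS "JKL" word.toList + 7 * pvS "MNO" word.toList + 8 * pvS "PQRS" word.toList +
      9 * pvS "TUV" word.toList + 10 * pvS "WXYZ" word.toList := by
  show (List.zip (PySem.List.pyRange 3 11 1) pvGroups).foldl _ 0 = _
  have hz : List.zip (PySem.List.pyRange 3 11 1) pvGroups =
      [((3 : Int), "ABC"), (4, "DEF"), (5, "GHI"), (6, "JKL"),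
       (7, "MNO"), (8, "PQRS"), (9, "TUV"), (10, "WXYZ")] := by decide
  rw [hz]
  simp only [List.foldl_cons, List.foldl_nil, pvS, pvInd]
  ring

-- the regrouped (per-group) sum equals the per-character branch sum
theorem pvGroups_eq_branchSum (l : List Char) (h : ∀ c ∈ l, pvDomChar c = true) :
    3 * pvS "ABC" l + 4 * pvS "DEF" l + 5 * pvS "GHI" l + 6 * pvS "JKL" l +
    7 * pvS "MNO" l + 8 * pvS "PQRS" l + 9 * pvS "TUV" l + 10 * pvS "WXYZ" l
      = (l.map pvBranch).sum := by
  induction l with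
  | nil => simp [pvS]
  | cons c l ih =>
    have hc : pvDomChar c = true := h c (List.mem_cons_self ..)
    have ih' := ih (fun x hx => h x (List.mem_cons_of_mem _ hx))
    simp only [pvS, List.map_cons, List.sum_cons] at *
    rw [pvBranch_eq_groups c hc]
    linarith [ih']

-- ===== VERDICT =====
theorem calculate_dial_time_spec : Claim_equal_calculate_dial_time := by
  intro word hdom
  have h : ∀ c ∈ word.toList, pvDomChar c = true := by
    simpa [Dom_calculate_dial_time, pvDomStr, List.all_eq_true] using hdom
  unfold Spec_calculate_dial_time calculate_dial_time
  rw [pvFold_eq, pvAlt_expand, pvGroups_eq_branchSum _ h]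
  ring
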